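-- pv_equiv track=rewrite | github.com/22-soeda/TWA_analyzer | sg_filter_analysis.py | get_enclosing_ticks
-- ===== SOURCE A (Python) =====
-- def get_enclosing_ticks(ticks, data_min, data_max):
--     ticks = sorted(ticks)
--     if not ticks: return data_min, data_max
--     lower = [t for t in ticks if t <= data_min]
--     start = lower[-1] if lower else ticks[0]
--     upper = [t for t in ticks if t >= data_max]
--     end = upper[0] if upper else ticks[-1]
--     return start, end
-- ===== SOURCE B (Python) =====
-- def get_enclosing_ticks(ticks, data_min, data_max):
--     if not ticks:
--         return data_min, data_max
--     gmin = gmax = lo = hi = None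
--     for t in ticks:
--         if gmin is None or t < gmin:
--             gmin = t
--         if gmax is None or t > gmax:
--             gmax = t
--         if t <= data_min and (lo is None or t > lo):
--             lo = t
--         if t >= data_max and (hi is None or t < hi):
--             hi = t
--     start = lo if lo is not None else gmin
--     end = hi if hi is not None else gmax
--     return start, end
-- ===== Notes on version B (the rewrite author's own statement) =====
-- stated objective: alternative
-- what changed: Replaces sort + two filter-comprehension scans with a single unordered pass maintaining running global min/max and the best lower/upper enclosing ticks.
import Mathlib
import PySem

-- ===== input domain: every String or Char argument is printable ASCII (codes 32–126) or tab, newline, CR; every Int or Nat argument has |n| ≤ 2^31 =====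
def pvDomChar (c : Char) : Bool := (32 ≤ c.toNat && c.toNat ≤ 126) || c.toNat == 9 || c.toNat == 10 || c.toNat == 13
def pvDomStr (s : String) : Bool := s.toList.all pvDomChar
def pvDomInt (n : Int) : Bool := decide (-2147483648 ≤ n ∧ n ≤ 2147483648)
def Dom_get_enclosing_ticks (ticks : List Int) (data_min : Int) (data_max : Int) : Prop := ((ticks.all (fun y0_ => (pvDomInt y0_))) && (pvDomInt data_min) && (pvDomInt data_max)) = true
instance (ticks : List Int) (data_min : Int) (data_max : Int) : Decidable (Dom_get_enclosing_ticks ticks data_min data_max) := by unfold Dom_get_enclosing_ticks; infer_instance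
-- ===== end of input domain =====

-- B replaces A's sort + two filter scans by one unordered linear pass keeping four running aggregates (alternative algorithm; no sort).

-- ===== PORT A =====
def get_enclosing_ticks (ticks : List Int) (data_min : Int) (data_max : Int) : Int × Int :=
  let ticks := PySem.List.sorted ticks (fun x => x) false
  if ticks = [] then (data_min, data_max) else
  let lower := ticks.filter (fun t => decide (t ≤ data_min))
  let start := if lower ≠ [] then lower.getLast! else ticks.head!
  let upper := ticks.filter (fun t => decide (t ≥ data_max))
  let «end» := if upper ≠ [] then upper.head! else ticks.getLast!
  (start, «end»)

-- ===== PORT B =====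
-- one loop step of Source B: updates (gmin, gmax, lo, hi) with tick t
def pvStep (data_min data_max : Int) (st : Option Int × Option Int × Option Int × Option Int) (t : Int) :
    Option Int × Option Int × Option Int × Option Int :=
  let gmin := match st.1 with | none => some t | some m => if t < m then some t else some m
  let gmax := match st.2.1 with | none => some t | some m => if t > m then some t else some m
  let lo := if t ≤ data_min then (match st.2.2.1 with | none => some t | some m => if t > m then some t else some m) else st.2.2.1
  let hi := if t ≥ data_max then (match st.2.2.2 with | none => some t | some m => if t < m then some t else some m) else st.2.2.2
  (gmin, gmax, lo, hi)

def get_enclosing_ticks_alt (ticks : List Int) (data_min : Int) (data_max : Int) : Int × Int :=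
  if ticks = [] then (data_min, data_max) else
  let st := ticks.foldl (pvStep data_min data_max) (none, none, none, none)
  let start := match st.2.2.1 with | some v => v | none => st.1.getD 0       -- gmin is some _ on nonempty input
  let «end» := match st.2.2.2 with | some v => v | none => st.2.1.getD 0     -- gmax is some _ on nonempty input
  (start, «end»)

-- ===== PRECONDITION & SPEC =====
def Spec_get_enclosing_ticks (ticks : List Int) (data_min : Int) (data_max : Int) (out : Int × Int) : Prop := out = get_enclosing_ticks_alt ticks data_min data_max
instance (ticks : List Int) (data_min : Int) (data_max : Int) (out : Int × Int) : Decidable (Spec_get_enclosing_ticks ticks data_min data_max out) := by unfold Spec_get_enclosing_ticks; infer_instance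

-- ===== CLAIM (what is proved, stated in full; the proofs are below) =====
def Claim_equal_get_enclosing_ticks : Prop := ∀ (ticks : List Int) (data_min : Int) (data_max : Int), Dom_get_enclosing_ticks ticks data_min data_max → Spec_get_enclosing_ticks ticks data_min data_max (get_enclosing_ticks ticks data_min data_max)

-- ===== LEMMAS AND PROOFS =====

-- component steps of pvStep
def pvMinStep (acc : Option Int) (t : Int) : Option Int :=
  match acc with | none => some t | some m => if t < m then some t else some m
def pvMaxStep (acc : Option Int) (t : Int) : Option Int :=
  match acc with | none => some t | some m => if t > m then some t else some m

theorem fold_pvStep (data_min data_max : Int) (l : List Int)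
    (a b c d : Option Int) :
    l.foldl (pvStep data_min data_max) (a, b, c, d) =
      (l.foldl pvMinStep a, l.foldl pvMaxStep b,
       l.foldl (fun acc t => if t ≤ data_min then pvMaxStep acc t else acc) c,
       l.foldl (fun acc t => if t ≥ data_max then pvMinStep acc t else acc) d) := by
  induction l generalizing a b c d with
  | nil => rfl
  | cons x xs ih => simp only [List.foldl_cons, pvStep, pvMinStep, pvMaxStep]; exact ih _ _ _ _

theorem fold_cond_filter (p : Int → Prop) [DecidablePred p] (f : Option Int → Int → Option Int)
    (l : List Int) (c : Option Int) :
    l.foldl (fun acc t => if p t then f acc t else acc) c =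
      (l.filter (fun t => decide (p t))).foldl f c := by
  induction l generalizing c with
  | nil => rfl
  | cons x xs ih =>
    by_cases h : p x <;> simp [h, ih]

theorem foldl_pvMinStep_some (l : List Int) (a : Int) :
    l.foldl pvMinStep (some a) = some (l.foldl min a) := by
  induction l generalizing a with
  | nil => rfl
  | cons x xs ih =>
    simp only [List.foldl_cons, pvMinStep]
    rcases lt_or_ge x a with h | h
    · rw [if_pos h, ih, min_eq_right h.le]
    · rw [if_neg (not_lt.2 h), ih, min_eq_left h]

theorem foldl_pvMaxStep_some (l : List Int) (a : Int) :
    l.foldl pvMaxStep (some a) = some (l.foldl max a) := by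
  induction l generalizing a with
  | nil => rfl
  | cons x xs ih =>
    simp only [List.foldl_cons, pvMaxStep]
    rcases lt_or_ge a x with h | h
    · rw [if_pos h, ih, max_eq_right h.le]
    · rw [if_neg (not_lt.2 h), ih, max_eq_left h]

theorem foldl_pvMinStep_none (l : List Int) :
    l.foldl pvMinStep none = PySem.List.min? l (fun x => x) := by
  cases l with
  | nil => rfl
  | cons x xs =>
    rw [PySem.List.min?_id_cons]
    simpa [pvMinStep] using foldl_pvMinStep_some xs x

theorem foldl_pvMaxStep_none (l : List Int) :
    l.foldl pvMaxStep none = PySem.List.max? l (fun x => x) := by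
  cases l with
  | nil => rfl
  | cons x xs =>
    rw [PySem.List.max?_id_cons]
    simpa [pvMaxStep] using foldl_pvMaxStep_some xs x

-- in a (≤)-pairwise list, every element is ≤ the last one
theorem pairwise_le_getLast (l : List Int) :
    l.Pairwise (· ≤ ·) → ∀ x ∈ l, ∀ (hne : l ≠ []), x ≤ l.getLast hne := by
  induction l with
  | nil => intro _ x hx; cases hx
  | cons a t ih =>
    intro h x hx hne
    rcases List.pairwise_cons.1 h with ⟨ha, ht⟩
    cases t with
    | nil =>
      have hxa : x = a := by simpa using hx
      subst hxa; simp [List.getLast]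
    | cons b u =>
      rw [List.getLast_cons (by simp : (b :: u) ≠ [])]
      rcases List.mem_cons.1 hx with rfl | hx'
      · exact ha _ (List.getLast_mem (by simp))
      · exact ih ht x hx' (by simp)

theorem pairwise_head_le (a : Int) (t : List Int) (h : (a :: t).Pairwise (· ≤ ·))
    (x : Int) (hx : x ∈ a :: t) : a ≤ x := by
  rcases List.mem_cons.1 hx with rfl | hx'
  · exact le_refl _
  · exact (List.pairwise_cons.1 h).1 _ hx'

theorem head!_eq_head (l : List Int) (h : l ≠ []) : l.head! = l.head h := by
  cases l with
  | nil => exact absurd rfl h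
  | cons a t => rfl

theorem getLast!_eq_getLast (l : List Int) (h : l ≠ []) : l.getLast! = l.getLast h := by
  cases l with
  | nil => exact absurd rfl h
  | cons a t =>
    rw [List.getLast!_eq_getLast?_getD, List.getLast?_eq_some_getLast h]
    rfl

-- max? over the unsorted filtered ticks is the last element of the sorted filtered list
theorem max?_filter_eq_getLast (ticks : List Int) (p : Int → Bool)
    (hne : (PySem.List.sorted ticks (fun x => x) false).filter p ≠ []) :
    PySem.List.max? (ticks.filter p) (fun x => x) =
      some (((PySem.List.sorted ticks (fun x => x) false).filter p).getLast hne) := by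
  have hperm : ((PySem.List.sorted ticks (fun x => x) false).filter p).Perm (ticks.filter p) :=
    (PySem.List.sorted_perm ticks (fun x => x) false).filter p
  have hpw : ((PySem.List.sorted ticks (fun x => x) false).filter p).Pairwise (· ≤ ·) :=
    (PySem.List.sorted_pairwise ticks (fun x => x)).filter p
  have hne' : ticks.filter p ≠ [] := by
    intro h; exact hne (List.Perm.eq_nil (h ▸ hperm))
  obtain ⟨m, hm⟩ : ∃ m, PySem.List.max? (ticks.filter p) (fun x => x) = some m := by
    cases hmx : PySem.List.max? (ticks.filter p) (fun x => x) with
    | none => exact absurd ((PySem.List.max?_eq_none_iff _ _).1 hmx) hne'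
    | some m => exact ⟨m, rfl⟩
  rw [hm]
  have hmem := hperm.mem_iff.2 (PySem.List.max?_mem hm)
  have hlast_mem := hperm.mem_iff.1 (List.getLast_mem hne)
  have h1 := pairwise_le_getLast _ hpw _ hmem hne
  have h2 := PySem.List.max?_isMax hm _ hlast_mem
  exact congrArg some (le_antisymm h1 h2)

-- min? over the unsorted filtered ticks is the head of the sorted filtered list
theorem min?_filter_eq_head (ticks : List Int) (p : Int → Bool)
    (hne : (PySem.List.sorted ticks (fun x => x) false).filter p ≠ []) :
    PySem.List.min? (ticks.filter p) (fun x => x) =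
      some (((PySem.List.sorted ticks (fun x => x) false).filter p).head hne) := by
  have hperm : ((PySem.List.sorted ticks (fun x => x) false).filter p).Perm (ticks.filter p) :=
    (PySem.List.sorted_perm ticks (fun x => x) false).filter p
  have hpw : ((PySem.List.sorted ticks (fun x => x) false).filter p).Pairwise (· ≤ ·) :=
    (PySem.List.sorted_pairwise ticks (fun x => x)).filter p
  have hne' : ticks.filter p ≠ [] := by
    intro h; exact hne (List.Perm.eq_nil (h ▸ hperm))
  obtain ⟨m, hm⟩ : ∃ m, PySem.List.min? (ticks.filter p) (fun x => x) = some m := by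
    cases hmx : PySem.List.min? (ticks.filter p) (fun x => x) with
    | none => exact absurd ((PySem.List.min?_eq_none_iff _ _).1 hmx) hne'
    | some m => exact ⟨m, rfl⟩
  rw [hm]
  have hmem := hperm.mem_iff.2 (PySem.List.min?_mem hm)
  have hhead_mem := hperm.mem_iff.1 (List.head_mem hne)
  obtain ⟨a, t, hat⟩ := List.exists_cons_of_ne_nil hne
  have h1 : ((PySem.List.sorted ticks (fun x => x) false).filter p).head hne ≤ m := by
    have := pairwise_head_le a t (hat ▸ hpw) m (hat ▸ hmem)
    simpa [hat] using this
  have h2 := PySem.List.min?_isMin hm _ hhead_mem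
  exact congrArg some (le_antisymm h2 h1)

theorem min?_eq_head_sorted (ticks : List Int)
    (hne : PySem.List.sorted ticks (fun x => x) false ≠ []) :
    PySem.List.min? ticks (fun x => x) =
      some ((PySem.List.sorted ticks (fun x => x) false).head hne) := by
  have hperm : (PySem.List.sorted ticks (fun x => x) false).Perm ticks :=
    PySem.List.sorted_perm ticks (fun x => x) false
  have hne' : ticks ≠ [] := by
    intro h; subst h; exact hne (List.Perm.eq_nil hperm)
  obtain ⟨a, t, hat⟩ := List.exists_cons_of_ne_nil hne
  obtain ⟨m, hm⟩ : ∃ m, PySem.List.min? ticks (fun x => x) = some m := by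
    cases hmx : PySem.List.min? ticks (fun x => x) with
    | none => exact absurd ((PySem.List.min?_eq_none_iff _ _).1 hmx) hne'
    | some m => exact ⟨m, rfl⟩
  rw [hm]
  have hha : ∀ y ∈ ticks, a ≤ y := PySem.List.key_head_sorted_le ticks (fun x => x) hat
  have ham : a ≤ m := hha _ (PySem.List.min?_mem hm)
  have hma : m ≤ a := PySem.List.min?_isMin hm a (hperm.mem_iff.1 (by simp [hat]))
  simp [hat, le_antisymm hma ham]

theorem max?_eq_getLast_sorted (ticks : List Int)
    (hne : PySem.List.sorted ticks (fun x => x) false ≠ []) :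
    PySem.List.max? ticks (fun x => x) =
      some ((PySem.List.sorted ticks (fun x => x) false).getLast hne) := by
  have hperm : (PySem.List.sorted ticks (fun x => x) false).Perm ticks :=
    PySem.List.sorted_perm ticks (fun x => x) false
  have hpw : (PySem.List.sorted ticks (fun x => x) false).Pairwise (· ≤ ·) :=
    PySem.List.sorted_pairwise ticks (fun x => x)
  have hne' : ticks ≠ [] := by
    intro h; subst h; exact hne (List.Perm.eq_nil hperm)
  obtain ⟨m, hm⟩ : ∃ m, PySem.List.max? ticks (fun x => x) = some m := by
    cases hmx : PySem.List.max? ticks (fun x => x) with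
    | none => exact absurd ((PySem.List.max?_eq_none_iff _ _).1 hmx) hne'
    | some m => exact ⟨m, rfl⟩
  rw [hm]
  have h1 := pairwise_le_getLast _ hpw _ (hperm.mem_iff.2 (PySem.List.max?_mem hm)) hne
  have h2 := PySem.List.max?_isMax hm _ (hperm.mem_iff.1 (List.getLast_mem hne))
  exact congrArg some (le_antisymm h1 h2)

-- ===== VERDICT (by name: the statement is the Claim_ definition above) =====
theorem get_enclosing_ticks_spec : Claim_equal_get_enclosing_ticks := by
  intro ticks data_min data_max _
  unfold Spec_get_enclosing_ticks get_enclosing_ticks get_enclosing_ticks_alt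
  by_cases hnil : ticks = []
  · subst hnil; rfl
  · have hsne : PySem.List.sorted ticks (fun x => x) false ≠ [] := by
      simpa [PySem.List.sorted_eq_nil_iff] using hnil
    simp only [hnil, hsne, if_false, fold_pvStep,
      fold_cond_filter (fun t => t ≤ data_min) pvMaxStep,
      fold_cond_filter (fun t => t ≥ data_max) pvMinStep,
      foldl_pvMinStep_none, foldl_pvMaxStep_none]
    rw [Prod.mk.injEq]
    constructor
    · -- start component
      by_cases hlo : List.filter (fun t => decide (t ≤ data_min)) (PySem.List.sorted ticks (fun x => x) false) = []
      · have hp := (PySem.List.sorted_perm ticks (fun x => x) false).filter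
          (fun t => decide (t ≤ data_min))
        rw [hlo] at hp
        rw [if_neg (not_not_intro hlo), (PySem.List.max?_eq_none_iff _ _).2 hp.symm.eq_nil,
          min?_eq_head_sorted ticks hsne, head!_eq_head _ hsne]
        rfl
      · rw [if_pos hlo, max?_filter_eq_getLast ticks _ hlo, getLast!_eq_getLast _ hlo]
    · -- end component
      by_cases hhi : List.filter (fun t => decide (t ≥ data_max)) (PySem.List.sorted ticks (fun x => x) false) = []
      · have hp := (PySem.List.sorted_perm ticks (fun x => x) false).filter
          (fun t => decide (t ≥ data_max))
        rw [hhi] at hp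
        rw [if_neg (not_not_intro hhi), (PySem.List.min?_eq_none_iff _ _).2 hp.symm.eq_nil,
          max?_eq_getLast_sorted ticks hsne, getLast!_eq_getLast _ hsne]
        rfl
      · rw [if_pos hhi, min?_filter_eq_head ticks _ hhi, head!_eq_head _ hhi]
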